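-- pv_equiv track=rewrite | github.com/rcaustin/ModelGuard | src/storage/file_extraction.py | select_relevant_files
-- ===== SOURCE A (Python) =====
-- from typing import Dict, Iterable, List, Tuple
--
-- def select_relevant_files(
--     all_files: Dict[str, str],
--     include_ext: Iterable[str],
--     max_files: int = 5,
--     prioritize_readme: bool = True,
-- ) -> Dict[str, str]:
--     """
--     Filter and select the most relevant files.
--
--     Args:
--         all_files: Mapping of filename -> text contents.
--         include_ext: Iterable of file extensions to include (e.g. {".py", ".txt"}).
--         max_files: Maximum number of files to return.
--         prioritize_readme: Whether to rank README-like files highest.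
--
--     Returns:
--         Dictionary {filename: content} for selected files.
--     """
--
--     def is_readme(name: str) -> bool:
--         n = name.lower()
--         return "readme" in n or n.endswith("readme.md") or n.endswith("readme")
--
--     # Filter by extension OR README special-case
--     candidates: List[Tuple[str, str]] = []
--     for name, content in all_files.items():
--         lower = name.lower()
--
--         if prioritize_readme and is_readme(lower):
--             candidates.append((name, content))
--             continue
--
--         if any(lower.endswith(ext) for ext in include_ext):
--             candidates.append((name, content))
--
--     # Sort README first (if enabled), then alphabetically
--     candidates.sort(
--         key=lambda pair: (
--             0 if (prioritize_readme and is_readme(pair[0])) else 1,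
--             pair[0].lower(),
--         )
--     )
--
--     # Limit number of files
--     selected = dict(candidates[:max_files])
--
--     return selected
-- ===== SOURCE B (Python) =====
-- def select_relevant_files(
--     all_files,
--     include_ext,
--     max_files=5,
--     prioritize_readme=True,
-- ):
--     def is_readme(name):
--         n = name.lower()
--         return "readme" in n or n.endswith("readme.md") or n.endswith("readme")
--
--     # One filter pass; pre-compute each kept file's rank and lowercase name once.
--     pool = []
--     for name, content in all_files.items():
--         lower = name.lower()
--         if (prioritize_readme and is_readme(lower)) or any(
--             lower.endswith(ext) for ext in include_ext
--         ):
--             rank = 0 if prioritize_readme and is_readme(lower) else 1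
--             pool.append((rank, lower, name, content))
--
--     # Top-k by repeated extraction of the first-minimal entry: no sort at all.
--     selected = {}
--     k = max_files
--     while k > 0 and pool:
--         bi = 0
--         for i in range(1, len(pool)):
--             if (pool[i][0], pool[i][1]) < (pool[bi][0], pool[bi][1]):
--                 bi = i
--         best = pool.pop(bi)
--         selected[best[2]] = best[3]
--         k -= 1
--     return selected
-- ===== Notes on version B (the rewrite author's own statement) =====
-- stated objective: alternative
-- what changed: B never sorts: it does one filter pass precomputing each kept file's (rank, lowercase-name) key, then selects the top max_files entries by repeatedly scanning for and popping the first-minimal entry, inserting each straight into the result dict, instead of A's full compound-key sort followed by a slice.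
-- intended difference: For negative max_files with more than |max_files| matching files, A's slice candidates[:max_files] accidentally returns all but the last |max_files| sorted candidates, while B selects no files, the intended meaning of a non-positive file limit. — e.g. on select_relevant_files([("readme.md", "r"), ("a.py", "x"), ("b.py", "y")], [".py"], -1, true): A returns [("readme.md", "r"), ("a.py", "x")], B returns []
import Mathlib
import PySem

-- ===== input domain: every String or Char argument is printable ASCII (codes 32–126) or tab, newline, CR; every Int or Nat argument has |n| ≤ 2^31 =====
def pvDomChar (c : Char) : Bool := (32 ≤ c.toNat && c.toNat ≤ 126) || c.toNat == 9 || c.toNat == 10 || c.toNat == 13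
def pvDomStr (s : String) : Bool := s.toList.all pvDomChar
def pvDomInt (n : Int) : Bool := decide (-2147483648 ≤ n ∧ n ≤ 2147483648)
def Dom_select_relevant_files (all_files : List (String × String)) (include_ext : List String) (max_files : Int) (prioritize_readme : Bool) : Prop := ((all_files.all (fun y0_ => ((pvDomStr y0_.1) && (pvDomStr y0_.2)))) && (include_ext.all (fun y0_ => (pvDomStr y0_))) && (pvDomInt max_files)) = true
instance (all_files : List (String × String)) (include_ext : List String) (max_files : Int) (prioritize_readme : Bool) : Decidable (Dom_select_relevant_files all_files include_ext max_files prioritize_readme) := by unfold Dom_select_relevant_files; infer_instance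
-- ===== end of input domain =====

-- B replaces A's compound-key sort + slice by sort-free top-k selection: one filter pass
-- precomputing each kept file's (rank, lowercase-name) key, then repeated extraction of the
-- first-minimal entry into the result dict (objective: alternative algorithm). Return values
-- are proved equal outside D_ (negative max_files, where A's slice drops from the end).
-- Python string comparison (code-point lexicographic) is represented on List Char.

-- ===== PORT A =====
-- is_readme (A's inner def)
def pvIsReadme (name : String) : Bool :=
  let n := PySem.Str.lower name
  PySem.Str.isIn "readme" n || PySem.Str.endswith n "readme.md" || PySem.Str.endswith n "readme"

def select_relevant_files (all_files : List (String × String)) (include_ext : List String) (max_files : Int) (prioritize_readme : Bool) : List (String × String) :=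
  -- filter loop over all_files.items()
  let candidates := all_files.foldl (fun acc nc =>
    let lower := PySem.Str.lower nc.1
    if prioritize_readme && pvIsReadme lower then acc ++ [nc]
    else if include_ext.any (fun ext => PySem.Str.endswith lower ext) then acc ++ [nc]
    else acc) []
  -- candidates.sort(key=lambda pair: (0 if … else 1, pair[0].lower())) — Python tuple key is a
  -- lexicographic pair; the string component is compared as its code-point list (exact)
  let sortedC := PySem.List.sorted candidates
    (fun pair => toLex (((if prioritize_readme && pvIsReadme pair.1 then 0 else 1 : Nat)), (PySem.Str.lower pair.1).toList)) false
  -- dict(candidates[:max_files])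
  (PySem.Dict.ofList (PySem.List.slice sortedC none (some max_files))).items

-- ===== PORT B =====
-- B's pool entries: (rank, lowercase name as code points, name, content)
def pvDfl : Nat × List Char × String × String := (0, [], "", "")

-- Python's tuple comparison (pool[i][0], pool[i][1]) < (pool[bi][0], pool[bi][1]) — lexicographic
def pvTupLt (a b : Nat × List Char × String × String) : Bool :=
  decide (toLex (a.1, a.2.1) < toLex (b.1, b.2.1))

-- the inner 'for i in range(1, len(pool))' argmin scan
def pvBestIdx (pool : List (Nat × List Char × String × String)) : Nat :=
  (List.range' 1 (pool.length - 1)).foldl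
    (fun bi i => if pvTupLt (pool.getD i pvDfl) (pool.getD bi pvDfl) then i else bi) 0

-- the 'while k > 0 and pool:' loop; fuel = pool.length makes the recursion structural
-- (each iteration pops exactly one pool entry, so the fuel is never the limiting guard)
def pvSelectLoop : Nat → Int → List (Nat × List Char × String × String) → PySem.Dict String String → PySem.Dict String String
  | 0, _, _, selected => selected
  | fuel + 1, k, pool, selected =>
    if 0 < k ∧ pool ≠ [] then
      let bi := pvBestIdx pool
      let best := pool.getD bi pvDfl
      pvSelectLoop fuel (k - 1) (pool.eraseIdx bi) (selected.insert best.2.2.1 best.2.2.2)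
    else selected

def select_relevant_files_alt (all_files : List (String × String)) (include_ext : List String) (max_files : Int) (prioritize_readme : Bool) : List (String × String) :=
  -- one filter pass building the keyed pool
  let pool := all_files.foldl (fun acc nc =>
    let lower := PySem.Str.lower nc.1
    if (prioritize_readme && pvIsReadme lower) || include_ext.any (fun ext => PySem.Str.endswith lower ext) then
      acc ++ [((if prioritize_readme && pvIsReadme lower then 0 else 1 : Nat), lower.toList, nc.1, nc.2)]
    else acc) []
  -- top-k extraction into the selected dict
  (pvSelectLoop pool.length max_files pool PySem.Dict.empty).items

-- ===== PRECONDITION & SPEC =====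
-- For negative max_files with more than |max_files| matching files, A's slice candidates[:max_files]
-- accidentally returns all but the last |max_files| sorted candidates, while B selects no files,
-- the intended meaning of a non-positive file limit.
def D_select_relevant_files (all_files : List (String × String)) (include_ext : List String) (max_files : Int) (prioritize_readme : Bool) : Prop :=
  max_files < 0 ∧ 0 < max_files + (all_files.filter (fun nc =>
    (prioritize_readme && pvIsReadme (PySem.Str.lower nc.1))
      || include_ext.any (fun ext => PySem.Str.endswith (PySem.Str.lower nc.1) ext))).length
instance (all_files : List (String × String)) (include_ext : List String) (max_files : Int) (prioritize_readme : Bool) : Decidable (D_select_relevant_files all_files include_ext max_files prioritize_readme) := by unfold D_select_relevant_files; infer_instance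

def Spec_select_relevant_files (all_files : List (String × String)) (include_ext : List String) (max_files : Int) (prioritize_readme : Bool) (out : List (String × String)) : Prop := ¬ D_select_relevant_files all_files include_ext max_files prioritize_readme → out = select_relevant_files_alt all_files include_ext max_files prioritize_readme
instance (all_files : List (String × String)) (include_ext : List String) (max_files : Int) (prioritize_readme : Bool) (out : List (String × String)) : Decidable (Spec_select_relevant_files all_files include_ext max_files prioritize_readme out) := by unfold Spec_select_relevant_files; infer_instance

def pvDiffWitness_select_relevant_files : (List (String × String)) × List String × Int × Bool :=
  ([("readme.md", "r"), ("a.py", "x"), ("b.py", "y")], [".py"], -1, true)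
def pvDiffWitnessOut_select_relevant_files : (List (String × String)) × (List (String × String)) :=
  ([("readme.md", "r"), ("a.py", "x")], [])

-- ===== CLAIM (what is proved, stated in full; the proofs are below) =====
def Claim_unchanged_select_relevant_files : Prop := ∀ (all_files : List (String × String)) (include_ext : List String) (max_files : Int) (prioritize_readme : Bool), Dom_select_relevant_files all_files include_ext max_files prioritize_readme → Spec_select_relevant_files all_files include_ext max_files prioritize_readme (select_relevant_files all_files include_ext max_files prioritize_readme)
def Claim_changed_select_relevant_files : Prop := Dom_select_relevant_files (pvDiffWitness_select_relevant_files.1) (pvDiffWitness_select_relevant_files.2.1) (pvDiffWitness_select_relevant_files.2.2.1) (pvDiffWitness_select_relevant_files.2.2.2) ∧ D_select_relevant_files (pvDiffWitness_select_relevant_files.1) (pvDiffWitness_select_relevant_files.2.1) (pvDiffWitness_select_relevant_files.2.2.1) (pvDiffWitness_select_relevant_files.2.2.2) ∧ select_relevant_files (pvDiffWitness_select_relevant_files.1) (pvDiffWitness_select_relevant_files.2.1) (pvDiffWitness_select_relevant_files.2.2.1) (pvDiffWitness_select_relevant_files.2.2.2) = pvDiffWitnessOut_select_relevant_files.1 ∧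 select_relevant_files_alt (pvDiffWitness_select_relevant_files.1) (pvDiffWitness_select_relevant_files.2.1) (pvDiffWitness_select_relevant_files.2.2.1) (pvDiffWitness_select_relevant_files.2.2.2) = pvDiffWitnessOut_select_relevant_files.2 ∧ pvDiffWitnessOut_select_relevant_files.1 ≠ pvDiffWitnessOut_select_relevant_files.2
def Claim_exact_select_relevant_files : Prop := ∀ (all_files : List (String × String)) (include_ext : List String) (max_files : Int) (prioritize_readme : Bool), Dom_select_relevant_files all_files include_ext max_files prioritize_readme → D_select_relevant_files all_files include_ext max_files prioritize_readme → select_relevant_files all_files include_ext max_files prioritize_readme ≠ select_relevant_files_alt all_files include_ext max_files prioritize_readme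

-- ===== LEMMAS AND PROOFS =====

-- lowercasing is idempotent, so A's is_readme(lower) in the filter equals is_readme(name) in the sort key
theorem pv_lowerChar_idem (c : Char) : PySem.Chars.lowerChar (PySem.Chars.lowerChar c) = PySem.Chars.lowerChar c := by
  simp only [PySem.Chars.lowerChar, PySem.Chars.isupper]
  split_ifs with h1 h2 <;> try rfl
  exfalso
  simp only [Bool.and_eq_true, decide_eq_true_eq, Char.le_def, UInt32.le_iff_toNat_le] at h1 h2
  have ha : ('A').val.toNat = 65 := by decide
  have hz : ('Z').val.toNat = 90 := by decide
  have hval : (Char.ofNat (c.toNat + 32)).toNat = c.toNat + 32 := by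
    rw [Char.toNat_ofNat, if_pos]
    left
    simp only [Char.toNat] at *
    omega
  simp only [Char.toNat] at *
  omega

theorem pvIsReadme_lower (s : String) : pvIsReadme (PySem.Str.lower s) = pvIsReadme s := by
  have h : PySem.Str.lower (PySem.Str.lower s) = PySem.Str.lower s := by
    apply String.toList_injective
    simp [PySem.Str.toList_lower, PySem.Chars.lower, List.map_map, Function.comp_def, pv_lowerChar_idem]
  simp only [pvIsReadme, h]

-- the pool entry B builds, as a function of the (name, content) pair
def pvG (pr : Bool) (nc : String × String) : Nat × List Char × String × String :=
  ((if pr && pvIsReadme (PySem.Str.lower nc.1) then 0 else 1 : Nat), (PySem.Str.lower nc.1).toList, nc.1, nc.2)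

def pvKey (t : Nat × List Char × String × String) : Lex (Nat × List Char) := toLex (t.1, t.2.1)

-- A's filter loop is a filter
theorem pv_candidates_eq (all_files : List (String × String)) (include_ext : List String) (pr : Bool) :
    all_files.foldl (fun acc nc =>
      let lower := PySem.Str.lower nc.1
      if pr && pvIsReadme lower then acc ++ [nc]
      else if include_ext.any (fun ext => PySem.Str.endswith lower ext) then acc ++ [nc]
      else acc) []
    = all_files.filter (fun nc => (pr && pvIsReadme (PySem.Str.lower nc.1))
        || include_ext.any (fun ext => PySem.Str.endswith (PySem.Str.lower nc.1) ext)) := by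
  have hfun : (fun (acc : List (String × String)) nc =>
      let lower := PySem.Str.lower nc.1
      if pr && pvIsReadme lower then acc ++ [nc]
      else if include_ext.any (fun ext => PySem.Str.endswith lower ext) then acc ++ [nc]
      else acc)
    = (fun acc nc => if ((pr && pvIsReadme (PySem.Str.lower nc.1))
        || include_ext.any (fun ext => PySem.Str.endswith (PySem.Str.lower nc.1) ext)) then acc ++ [(fun x => x) nc] else acc) := by
    funext acc nc
    by_cases h1 : pr && pvIsReadme (PySem.Str.lower nc.1) <;>
      by_cases h2 : include_ext.any (fun ext => PySem.Str.endswith (PySem.Str.lower nc.1) ext) <;>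
      simp [h1, h2]
  rw [hfun, PySem.List.foldl_append_if]
  simp

-- B's filter loop is the same filter, mapped through pvG
theorem pv_pool_eq (all_files : List (String × String)) (include_ext : List String) (pr : Bool) :
    all_files.foldl (fun acc nc =>
      let lower := PySem.Str.lower nc.1
      if (pr && pvIsReadme lower) || include_ext.any (fun ext => PySem.Str.endswith lower ext) then
        acc ++ [((if pr && pvIsReadme lower then 0 else 1 : Nat), lower.toList, nc.1, nc.2)]
      else acc) []
    = (all_files.filter (fun nc => (pr && pvIsReadme (PySem.Str.lower nc.1))
        || include_ext.any (fun ext => PySem.Str.endswith (PySem.Str.lower nc.1) ext))).map (pvG pr) := by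
  rw [show (fun (acc : List (Nat × List Char × String × String)) (nc : String × String) =>
      let lower := PySem.Str.lower nc.1
      if (pr && pvIsReadme lower) || include_ext.any (fun ext => PySem.Str.endswith lower ext) then
        acc ++ [((if pr && pvIsReadme lower then 0 else 1 : Nat), lower.toList, nc.1, nc.2)]
      else acc)
    = (fun acc nc => if ((pr && pvIsReadme (PySem.Str.lower nc.1))
        || include_ext.any (fun ext => PySem.Str.endswith (PySem.Str.lower nc.1) ext)) then acc ++ [pvG pr nc] else acc)
    from rfl, PySem.List.foldl_append_if]
  simp

-- an argmin-style fold returns its start or one of the scanned indices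
theorem pv_fold_choice_mem (c : Nat → Nat → Bool) (L : List Nat) :
    ∀ b : Nat, L.foldl (fun bi i => if c i bi then i else bi) b = b
      ∨ L.foldl (fun bi i => if c i bi then i else bi) b ∈ L := by
  induction L with
  | nil => intro b; left; rfl
  | cons i L ih =>
    intro b
    simp only [List.foldl_cons]
    rcases ih (if c i b then i else b) with h | h
    · rw [h]; split
      · right; simp
      · left; rfl
    · right; simp [h]

theorem pvBestIdx_lt (pool : List (Nat × List Char × String × String)) (h : pool ≠ []) :
    pvBestIdx pool < pool.length := by
  have hlen : 1 ≤ pool.length := List.length_pos_iff.mpr h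
  unfold pvBestIdx
  rcases pv_fold_choice_mem (fun i bi => pvTupLt (pool.getD i pvDfl) (pool.getD bi pvDfl))
    (List.range' 1 (pool.length - 1)) 0 with hc | hc
  · omega
  · have := (List.mem_range'_1.mp hc).2
    omega

-- the argmin fold over ys ++ [z] computed on indices < |ys| agrees with the fold over ys
theorem pv_fold_idx_congr (ys : List (Nat × List Char × String × String))
    (z : Nat × List Char × String × String) (L : List Nat) (hL : ∀ i ∈ L, i < ys.length) :
    ∀ b : Nat, b < ys.length →
    L.foldl (fun bi i => if pvTupLt ((ys ++ [z]).getD i pvDfl) ((ys ++ [z]).getD bi pvDfl) then i else bi) b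
    = L.foldl (fun bi i => if pvTupLt (ys.getD i pvDfl) (ys.getD bi pvDfl) then i else bi) b := by
  induction L with
  | nil => intro b _; rfl
  | cons i L ih =>
    intro b hb
    have hi : i < ys.length := hL i (by simp)
    simp only [List.foldl_cons, List.getD_append _ _ _ _ hi, List.getD_append _ _ _ _ hb]
    split
    · exact ih (fun j hj => hL j (by simp [hj])) i hi
    · exact ih (fun j hj => hL j (by simp [hj])) b hb

theorem pvBestIdx_snoc (ys : List (Nat × List Char × String × String))
    (z : Nat × List Char × String × String) (h : ys ≠ []) :
    pvBestIdx (ys ++ [z])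
    = if pvTupLt z (ys.getD (pvBestIdx ys) pvDfl) then ys.length else pvBestIdx ys := by
  have hlen : 1 ≤ ys.length := List.length_pos_iff.mpr h
  have hrange : List.range' 1 ((ys ++ [z]).length - 1)
      = List.range' 1 (ys.length - 1) ++ [ys.length] := by
    have h1 : (ys ++ [z]).length - 1 = (ys.length - 1) + 1 := by simp; omega
    rw [h1, List.range'_concat]
    congr 1
    simp
    omega
  unfold pvBestIdx
  rw [hrange, List.foldl_append]
  rw [pv_fold_idx_congr ys z _ (fun i hi => by have := (List.mem_range'_1.mp hi).2; omega) 0 (by omega)]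
  have hbi : (List.range' 1 (ys.length - 1)).foldl
      (fun bi i => if pvTupLt (ys.getD i pvDfl) (ys.getD bi pvDfl) then i else bi) 0 = pvBestIdx ys := rfl
  rw [hbi]
  have hblt : pvBestIdx ys < ys.length := pvBestIdx_lt ys h
  have hz : (ys ++ [z]).getD ys.length pvDfl = z := by
    rw [List.getD_append_right]
    · simp
    · exact le_refl _
  simp only [List.foldl_cons, List.foldl_nil, List.getD_append _ _ _ _ hblt, hz]

-- sorted (ys ++ [x]) is an insertion into the sorted prefix
theorem pv_sorted_snoc {α κ : Type} [LT κ] [DecidableLT κ] (ys : List α) (x : α) (key : α → κ) :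
    PySem.List.sorted (ys ++ [x]) key false
    = PySem.List.insertBy (fun a b => decide (key a < key b)) x (PySem.List.sorted ys key false) := by
  rw [PySem.List.sorted_eq_foldl_insertBy, PySem.List.sorted_eq_foldl_insertBy,
    List.foldl_append, List.foldl_cons, List.foldl_nil]

theorem pv_insertBy_cons {α : Type} (f : α → α → Bool) (z m : α) (S : List α) :
    PySem.List.insertBy f z (m :: S) = if f z m then z :: m :: S else m :: PySem.List.insertBy f z S := rfl

-- head of the stable sort is the first-minimal entry; tail is the sort of the pool without it
theorem pv_sorted_extract (pool : List (Nat × List Char × String × String)) (h : pool ≠ []) :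
    PySem.List.sorted pool pvKey false
    = pool.getD (pvBestIdx pool) pvDfl
      :: PySem.List.sorted (pool.eraseIdx (pvBestIdx pool)) pvKey false := by
  induction pool using List.reverseRecOn with
  | nil => exact absurd rfl h
  | append_singleton ys z ih =>
    by_cases hys : ys = []
    · subst hys
      simp [pvBestIdx, PySem.List.sorted_eq_foldl_insertBy, PySem.List.insertBy]
    · have hblt : pvBestIdx ys < ys.length := pvBestIdx_lt ys hys
      rw [pv_sorted_snoc, ih hys, pvBestIdx_snoc ys z hys]
      by_cases hlt : pvTupLt z (ys.getD (pvBestIdx ys) pvDfl)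
      · rw [if_pos hlt]
        have hz : (ys ++ [z]).getD ys.length pvDfl = z := by
          rw [List.getD_append_right]
          · simp
          · exact le_refl _
        have herase : (ys ++ [z]).eraseIdx ys.length = ys := by
          rw [List.eraseIdx_append_of_length_le (le_refl _)]
          simp
        rw [hz, herase, ih hys, pv_insertBy_cons]
        exact if_pos hlt
      · rw [if_neg hlt]
        have hg : (ys ++ [z]).getD (pvBestIdx ys) pvDfl = ys.getD (pvBestIdx ys) pvDfl :=
          List.getD_append _ _ _ _ hblt
        have herase : (ys ++ [z]).eraseIdx (pvBestIdx ys) = ys.eraseIdx (pvBestIdx ys) ++ [z] :=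
          List.eraseIdx_append_of_lt_length hblt _
        rw [hg, herase, pv_sorted_snoc, pv_insertBy_cons]
        exact if_neg hlt

-- the while-loop inserts exactly the first k entries of the stable sort, in order
theorem pv_loop_eq : ∀ (fuel : Nat) (pool : List (Nat × List Char × String × String)),
    pool.length ≤ fuel → ∀ (k : Int), 0 ≤ k → ∀ (d : PySem.Dict String String),
    pvSelectLoop fuel k pool d
    = ((PySem.List.sorted pool pvKey false).take k.toNat).foldl
        (fun d t => d.insert t.2.2.1 t.2.2.2) d := by
  intro fuel
  induction fuel with
  | zero =>
    intro pool hp k hk d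
    have hnil : pool = [] := List.eq_nil_of_length_eq_zero (by omega)
    subst hnil
    simp [pvSelectLoop, PySem.List.sorted_eq_foldl_insertBy]
  | succ fuel ih =>
    intro pool hp k hk d
    unfold pvSelectLoop
    by_cases h : 0 < k ∧ pool ≠ []
    · rw [if_pos h]
      obtain ⟨hk0, hpool⟩ := h
      have hblt : pvBestIdx pool < pool.length := pvBestIdx_lt pool hpool
      rw [pv_sorted_extract pool hpool]
      have htn : k.toNat = (k - 1).toNat + 1 := by omega
      rw [htn, List.take_succ_cons, List.foldl_cons]
      exact ih (pool.eraseIdx (pvBestIdx pool))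
        (by rw [List.length_eraseIdx_of_lt hblt]; omega) (k - 1) (by omega) _
    · rw [if_neg h]
      by_cases hpool : pool = []
      · subst hpool
        simp [PySem.List.sorted_eq_foldl_insertBy]
      · have hk0 : k = 0 := by
          have : ¬ 0 < k := fun hkpos => h ⟨hkpos, hpool⟩
          omega
        simp [hk0]

-- the loop returns its accumulator unchanged for a non-positive limit
theorem pv_loop_nonpos (fuel : Nat) (k : Int) (hk : k ≤ 0)
    (pool : List (Nat × List Char × String × String)) (d : PySem.Dict String String) :
    pvSelectLoop fuel k pool d = d := by
  cases fuel with
  | zero => rfl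
  | succ fuel =>
    unfold pvSelectLoop
    rw [if_neg]
    rintro ⟨h1, _⟩
    omega

-- folding inserts over the mapped pool is folding inserts over the (name, content) pairs
theorem pv_foldl_insert_map (pr : Bool) (l : List (String × String)) (d : PySem.Dict String String) :
    (l.map (pvG pr)).foldl (fun d t => d.insert t.2.2.1 t.2.2.2) d
    = l.foldl (fun d p => d.insert p.1 p.2) d := by
  rw [List.foldl_map]
  rfl

-- stable sort commutes with map when the key is read through the map
theorem pv_insertBy_map {α β κ : Type} [LT κ] [DecidableLT κ] (g : α → β) (key : β → κ)
    (x : α) (l : List α) :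
    PySem.List.insertBy (fun a b => decide (key a < key b)) (g x) (l.map g)
    = (PySem.List.insertBy (fun a b => decide (key (g a) < key (g b))) x l).map g := by
  induction l with
  | nil => rfl
  | cons y l ih =>
    simp only [List.map_cons, PySem.List.insertBy]
    split
    · simp
    · simp only [List.map_cons, List.cons.injEq, true_and]
      exact ih

theorem pv_sorted_map {α β κ : Type} [LT κ] [DecidableLT κ] (g : α → β) (key : β → κ) (l : List α) :
    PySem.List.sorted (l.map g) key false
    = (PySem.List.sorted l (fun a => key (g a)) false).map g := by
  induction l using List.reverseRecOn with
  | nil => rfl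
  | append_singleton ys x ih =>
    rw [List.map_append, List.map_singleton, pv_sorted_snoc, pv_sorted_snoc, ih, pv_insertBy_map]

-- B's precomputed key equals A's sort key (lowercasing is idempotent)
theorem pv_key_eq (pr : Bool) :
    (fun nc : String × String => pvKey (pvG pr nc))
    = (fun pair : String × String =>
        toLex (((if pr && pvIsReadme pair.1 then 0 else 1 : Nat)), (PySem.Str.lower pair.1).toList)) := by
  funext nc
  simp only [pvKey, pvG, pvIsReadme_lower]

-- xs[:b] for negative b is a take of all but the last |b| entries
theorem pv_slice_neg {α : Type} (xs : List α) (b : Int) (hb : b < 0) :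
    PySem.List.slice xs none (some b) = xs.take (xs.length - (-b).toNat) := by
  obtain ⟨k, hk, rfl⟩ : ∃ k : Nat, 0 < k ∧ b = -(k : Int) := ⟨(-b).toNat, by omega, by omega⟩
  rw [PySem.List.slice_to_neg_natCast xs k hk]
  congr 1
  omega

-- a dict built from a nonempty pair list has a nonempty items list
theorem pv_insert_items_ne (d : PySem.Dict String String) (k v : String) (h : d.items ≠ []) :
    (d.insert k v).items ≠ [] := by
  rw [PySem.Dict.items_insert]
  split
  · simpa using h
  · simp

theorem pv_foldl_insert_items_ne (l : List (String × String)) :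
    ∀ d : PySem.Dict String String, d.items ≠ [] →
    (l.foldl (fun d p => d.insert p.1 p.2) d).items ≠ [] := by
  induction l with
  | nil => intro d h; exact h
  | cons p l ih =>
    intro d h
    exact ih _ (pv_insert_items_ne d p.1 p.2 h)

theorem pv_ofList_items_ne (l : List (String × String)) (h : l ≠ []) :
    (PySem.Dict.ofList l).items ≠ [] := by
  obtain ⟨p, rest, rfl⟩ := List.exists_cons_of_ne_nil h
  show ((rest.foldl (fun d q => d.insert q.1 q.2) ((PySem.Dict.empty).insert p.1 p.2))).items ≠ []
  apply pv_foldl_insert_items_ne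
  rw [PySem.Dict.items_insert]
  simp

-- take of (length - n) is empty once n covers the whole list
theorem pv_take_zero_items (S : List (String × String)) (n : Nat) (h : S.length ≤ n) :
    (PySem.Dict.ofList (S.take (S.length - n))).items = [] := by
  rw [Nat.sub_eq_zero_of_le h]
  rfl

-- ===== VERDICT (by name: the statement is the Claim_ definition above) =====
set_option maxHeartbeats 1000000 in
theorem select_relevant_files_spec : Claim_unchanged_select_relevant_files := by
  intro all_files include_ext max_files prioritize_readme _ hnD
  show _ = _
  unfold select_relevant_files select_relevant_files_alt
  dsimp only []
  rw [pv_candidates_eq, pv_pool_eq]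
  by_cases hm : 0 ≤ max_files
  · rw [PySem.List.slice_to _ hm,
      pv_loop_eq _ _ (le_refl _) _ hm,
      pv_sorted_map (pvG prioritize_readme) pvKey, pv_key_eq,
      ← List.map_take, pv_foldl_insert_map]
    rfl
  · -- max_files < 0, and ¬D_ gives max_files + |candidates| ≤ 0: both sides are empty
    push_neg at hm
    have hle : max_files + ((all_files.filter (fun nc =>
        (prioritize_readme && pvIsReadme (PySem.Str.lower nc.1))
          || include_ext.any (fun ext => PySem.Str.endswith (PySem.Str.lower nc.1) ext))).length : Int) ≤ 0 := by
      unfold D_select_relevant_files at hnD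
      push_neg at hnD
      exact hnD hm
    rw [pv_slice_neg _ _ hm, pv_loop_nonpos _ _ (by omega)]
    rw [pv_take_zero_items _ _ (by rw [PySem.List.length_sorted]; omega)]
    rfl

set_option maxHeartbeats 4000000 in
theorem select_relevant_files_changed : Claim_changed_select_relevant_files := by
  unfold Claim_changed_select_relevant_files
  refine ⟨by decide, by decide, by decide, by decide, by decide⟩

theorem select_relevant_files_tight : Claim_exact_select_relevant_files := by
  intro all_files include_ext max_files prioritize_readme _ hD
  obtain ⟨hm, hc⟩ := hD
  have hB : select_relevant_files_alt all_files include_ext max_files prioritize_readme = [] := by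
    unfold select_relevant_files_alt
    dsimp only []
    rw [pv_loop_nonpos _ _ (by omega)]
    rfl
  have hA : select_relevant_files all_files include_ext max_files prioritize_readme ≠ [] := by
    unfold select_relevant_files
    dsimp only []
    rw [pv_candidates_eq, pv_slice_neg _ _ hm]
    apply pv_ofList_items_ne
    rw [Ne, List.take_eq_nil_iff]
    push_neg
    refine ⟨?_, ?_⟩
    · rw [PySem.List.length_sorted]
      omega
    · rw [Ne, PySem.List.sorted_eq_nil_iff]
      intro hnil
      rw [hnil] at hc
      simp at hc
      omega
  intro heq
  exact hA (heq.trans hB)
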